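-- pv_equiv track=rewrite | github.com/edelans/Advent-of-Code | aoc2022/day23.py | mdump
-- ===== SOURCE A (Python) =====
-- def mdump(ground):
--     """
--     Helper function to print a map
--     when the map is a set,
--     """
--     xmin = min([int(i) for (i, j) in ground])
--     xmax = max([int(i) for (i, j) in ground])
--     ymin = min([int(j) for (i, j) in ground])
--     ymax = max([int(j) for (i, j) in ground])
--     dump = ""
--     for y in range(ymax, ymin - 1, -1):
--         for x in range(xmin, xmax + 1):
--             if (x, y) in ground:
--                 dump += "#"
--             else:
--                 dump += "."
--         dump += "\n"
--     return dump
-- ===== SOURCE B (Python) =====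
-- def mdump(ground):
--     """
--     Helper function to print a map
--     when the map is a set,
--     """
--     xs = [int(i) for (i, j) in ground]
--     ys = [int(j) for (i, j) in ground]
--     xmin, xmax = min(xs), max(xs)
--     ymin, ymax = min(ys), max(ys)
--     width = xmax - xmin + 1
--     height = ymax - ymin + 1
--     grid = [["."] * width for _ in range(height)]
--     for (i, j) in ground:
--         grid[ymax - int(j)][int(i) - xmin] = "#"
--     return "".join("".join(row) + "\n" for row in grid)
-- ===== Notes on version B (the rewrite author's own statement) =====
-- stated objective: faster
-- what changed: A tests every grid cell for membership in ground (an inner scan per cell); B allocates the grid of '.' once and scatters a '#' directly at each point's row/column, removing the per-cell membership test.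
import Mathlib
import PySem

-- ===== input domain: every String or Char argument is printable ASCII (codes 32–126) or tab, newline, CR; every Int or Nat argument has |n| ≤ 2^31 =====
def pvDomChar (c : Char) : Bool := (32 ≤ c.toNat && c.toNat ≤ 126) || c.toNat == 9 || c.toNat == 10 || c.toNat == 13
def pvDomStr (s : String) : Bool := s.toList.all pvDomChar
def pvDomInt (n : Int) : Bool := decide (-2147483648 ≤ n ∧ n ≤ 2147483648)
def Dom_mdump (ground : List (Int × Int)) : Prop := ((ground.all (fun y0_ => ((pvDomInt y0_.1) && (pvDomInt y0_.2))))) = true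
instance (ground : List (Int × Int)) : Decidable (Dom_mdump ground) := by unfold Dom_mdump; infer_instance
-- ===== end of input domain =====

-- B replaces A's per-cell membership scan of `ground` by allocating the '.'-grid once and
-- scattering '#' at each point's cell (objective: faster; a timing run measures it).

-- ===== PORT A =====
-- literal transliteration of A: four min/max passes, then a y-descending, x-ascending double
-- loop appending '#' (if the cell is in ground) or '.', and '\n' after each row.
def mdump (ground : List (Int × Int)) : String :=
  let xmin := (PySem.List.min? (ground.map (fun p => p.1)) (fun v => v)).getD 0
  let xmax := (PySem.List.max? (ground.map (fun p => p.1)) (fun v => v)).getD 0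
  let ymin := (PySem.List.min? (ground.map (fun p => p.2)) (fun v => v)).getD 0
  let ymax := (PySem.List.max? (ground.map (fun p => p.2)) (fun v => v)).getD 0
  let dump : List Char :=
    (PySem.List.pyRange ymax (ymin - 1) (-1)).foldl (fun acc y =>
      ((PySem.List.pyRange xmin (xmax + 1) 1).foldl (fun acc2 x =>
        acc2 ++ (if (x, y) ∈ ground then ['#'] else ['.'])) acc) ++ ['\n']) []
  String.ofList dump

-- ===== PORT B =====
-- one scatter-write of Source B's loop body: grid[ymax - j][i - xmin] = '#'
def pvScatter (ymax xmin : Int) (g : List (List Char)) (p : Int × Int) : List (List Char) :=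
  g.modify (ymax - p.2).toNat (fun row => row.set (p.1 - xmin).toNat '#')

-- literal transliteration of Source B: bounds, an all-'.' grid, one scatter pass, then join rows.
def mdump_alt (ground : List (Int × Int)) : String :=
  let xs := ground.map (fun p => p.1)
  let ys := ground.map (fun p => p.2)
  let xmin := (PySem.List.min? xs (fun v => v)).getD 0
  let xmax := (PySem.List.max? xs (fun v => v)).getD 0
  let ymin := (PySem.List.min? ys (fun v => v)).getD 0
  let ymax := (PySem.List.max? ys (fun v => v)).getD 0
  let width := (xmax - xmin + 1).toNat
  let height := (ymax - ymin + 1).toNat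
  let grid0 : List (List Char) := List.replicate height (List.replicate width '.')
  let grid := ground.foldl (pvScatter ymax xmin) grid0
  String.ofList ((grid.map (fun row => row ++ ['\n'])).flatten)

-- ===== PRECONDITION & SPEC =====
-- Pre_ excludes only the empty list, on which A raises ValueError (min of an empty sequence).
def Pre_mdump (ground : List (Int × Int)) : Prop := ground ≠ []
instance (ground : List (Int × Int)) : Decidable (Pre_mdump ground) := by unfold Pre_mdump; infer_instance
def pvWitness_mdump : (List (Int × Int)) := [(0, 0), (1, 1)]
def Spec_mdump (ground : List (Int × Int)) (out : String) : Prop := out = mdump_alt ground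
instance (ground : List (Int × Int)) (out : String) : Decidable (Spec_mdump ground out) := by unfold Spec_mdump; infer_instance

-- ===== CLAIM (what is proved, stated in full; the proofs are below) =====
def Claim_equal_mdump : Prop := ∀ (ground : List (Int × Int)), Dom_mdump ground → Pre_mdump ground → Spec_mdump ground (mdump ground)

-- ===== LEMMAS AND PROOFS =====

-- cell lookup in a char grid
def pvCell? (g : List (List Char)) (r c : Nat) : Option Char := g[r]? >>= fun row => row[c]?

lemma pvCell?_scatter_step (ymax xmin : Int) (g : List (List Char)) (p : Int × Int) (r c : Nat) :
    pvCell? (pvScatter ymax xmin g p) r c =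
      (pvCell? g r c).map (fun ch => if (ymax - p.2).toNat = r ∧ (p.1 - xmin).toNat = c then '#' else ch) := by
  unfold pvCell? pvScatter
  rw [List.getElem?_modify]
  cases hrow : g[r]? with
  | none => rfl
  | some row =>
    by_cases hR : (ymax - p.2).toNat = r
    · by_cases hC : (p.1 - xmin).toNat = c
      · by_cases hlen : c < row.length
        · simp [hR, hC, hlen]
        · simp [hR, hC, hlen]
      · simp [hR, hC]
    · simp [hR]

lemma pvCell?_scatter (ymax xmin : Int) (ps : List (Int × Int)) (g : List (List Char)) (r c : Nat) :
    pvCell? (ps.foldl (pvScatter ymax xmin) g) r c =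
      (pvCell? g r c).map (fun ch =>
        if ∃ p ∈ ps, (ymax - p.2).toNat = r ∧ (p.1 - xmin).toNat = c then '#' else ch) := by
  induction ps generalizing g with
  | nil => cases h : pvCell? g r c <;> simp [h]
  | cons p ps ih =>
    rw [List.foldl_cons, ih, pvCell?_scatter_step]
    cases h : pvCell? g r c with
    | none => rfl
    | some ch =>
      simp only [Option.map_some, List.exists_mem_cons_iff]
      by_cases hp : (ymax - p.2).toNat = r ∧ (p.1 - xmin).toNat = c
      · simp [hp]
      · simp only [or_iff_right hp]
        rw [if_neg hp]

lemma pvExists_iff (ground : List (Int × Int)) (xmin xmax ymin ymax : Int) (r c : Nat)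
    (hb : ∀ p ∈ ground, xmin ≤ p.1 ∧ p.1 ≤ xmax ∧ ymin ≤ p.2 ∧ p.2 ≤ ymax) :
    (∃ p ∈ ground, (ymax - p.2).toNat = r ∧ (p.1 - xmin).toNat = c) ↔
      (xmin + (c : Int), ymax - (r : Int)) ∈ ground := by
  constructor
  · rintro ⟨p, hp, h1, h2⟩
    obtain ⟨b1, b2, b3, b4⟩ := hb p hp
    have e2 : p.2 = ymax - (r : Int) := by omega
    have e1 : p.1 = xmin + (c : Int) := by omega
    have : (xmin + (c : Int), ymax - (r : Int)) = p := by
      rw [← e1, ← e2]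
    rw [this]; exact hp
  · intro h
    refine ⟨_, h, ?_, ?_⟩ <;> simp

-- B's scattered grid is exactly the membership-test grid, row by row
lemma pvFoldl_scatter_length (ymax xmin : Int) (ps : List (Int × Int)) (g : List (List Char)) :
    (ps.foldl (pvScatter ymax xmin) g).length = g.length := by
  induction ps generalizing g with
  | nil => rfl
  | cons p ps ih => rw [List.foldl_cons, ih, pvScatter, List.length_modify]

lemma pvGrid_eq (ground : List (Int × Int)) (xmin xmax ymin ymax : Int)
    (hb : ∀ p ∈ ground, xmin ≤ p.1 ∧ p.1 ≤ xmax ∧ ymin ≤ p.2 ∧ p.2 ≤ ymax) :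
    ground.foldl (pvScatter ymax xmin)
        (List.replicate (ymax - ymin + 1).toNat (List.replicate (xmax - xmin + 1).toNat '.')) =
      (List.range (ymax - ymin + 1).toNat).map (fun (r : Nat) =>
        (List.range (xmax - xmin + 1).toNat).map (fun (c : Nat) =>
          if (xmin + (c : Int), ymax - (r : Int)) ∈ ground then '#' else '.')) := by
  set H := (ymax - ymin + 1).toNat with hH
  set W := (xmax - xmin + 1).toNat with hW
  set g0 : List (List Char) := List.replicate H (List.replicate W '.') with hg0
  set L := ground.foldl (pvScatter ymax xmin) g0 with hL
  have hlen : L.length = H := by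
    rw [hL, pvFoldl_scatter_length, hg0, List.length_replicate]
  have hcell : ∀ r c : Nat, pvCell? L r c =
      if r < H ∧ c < W then some (if (xmin + (c : Int), ymax - (r : Int)) ∈ ground then '#' else '.')
      else none := by
    intro r c
    rw [hL, pvCell?_scatter]
    by_cases hr : r < H
    · by_cases hc : c < W
      · have h0 : pvCell? g0 r c = some '.' := by
          simp [pvCell?, hg0, hr, hc]
        rw [h0, Option.map_some, if_congr (pvExists_iff ground xmin xmax ymin ymax r c hb) rfl rfl]
        simp [hr, hc]
      · have h0 : pvCell? g0 r c = none := by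
          simp [pvCell?, hg0, hr, hc]
        rw [h0]
        simp [hc]
    · have h0 : pvCell? g0 r c = none := by
        simp [pvCell?, hg0, hr]
      rw [h0]
      simp [hr]
  apply List.ext_getElem?
  intro r
  by_cases hr : r < H
  · have h1 : L[r]? = some (L[r]'(by omega)) := List.getElem?_eq_getElem (by omega)
    rw [h1, List.getElem?_map, List.getElem?_range hr, Option.map_some]
    congr 1
    apply List.ext_getElem?
    intro c
    have h2 : (L[r]'(by omega))[c]? = pvCell? L r c := by
      rw [pvCell?, h1]; rfl
    rw [h2, hcell r c, List.getElem?_map]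
    by_cases hc : c < W
    · rw [List.getElem?_range hc, if_pos ⟨hr, hc⟩, Option.map_some]
    · rw [if_neg (by tauto), List.getElem?_eq_none (by simpa using hc), Option.map_none]
  · rw [List.getElem?_eq_none (by omega), List.getElem?_eq_none (by simpa using hr)]

-- ===== VERDICT (by name: the statement is the Claim_ definition above) =====
theorem mdump_spec : Claim_equal_mdump := by
  intro ground _hdom hpre
  unfold Spec_mdump mdump mdump_alt
  dsimp only
  cases hx1 : PySem.List.min? (ground.map (fun p => p.1)) (fun v => v) with
  | none => exact absurd (by simpa [PySem.List.min?_eq_none_iff] using hx1) hpre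
  | some xmin =>
  cases hx2 : PySem.List.max? (ground.map (fun p => p.1)) (fun v => v) with
  | none => exact absurd (by simpa [PySem.List.max?_eq_none_iff] using hx2) hpre
  | some xmax =>
  cases hy1 : PySem.List.min? (ground.map (fun p => p.2)) (fun v => v) with
  | none => exact absurd (by simpa [PySem.List.min?_eq_none_iff] using hy1) hpre
  | some ymin =>
  cases hy2 : PySem.List.max? (ground.map (fun p => p.2)) (fun v => v) with
  | none => exact absurd (by simpa [PySem.List.max?_eq_none_iff] using hy2) hpre
  | some ymax =>
  simp only [Option.getD_some]
  have hb : ∀ p ∈ ground, xmin ≤ p.1 ∧ p.1 ≤ xmax ∧ ymin ≤ p.2 ∧ p.2 ≤ ymax := by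
    intro p hp
    exact ⟨PySem.List.min?_isMin hx1 p.1 (List.mem_map_of_mem hp),
           PySem.List.max?_isMax hx2 p.1 (List.mem_map_of_mem hp),
           PySem.List.min?_isMin hy1 p.2 (List.mem_map_of_mem hp),
           PySem.List.max?_isMax hy2 p.2 (List.mem_map_of_mem hp)⟩
  rw [pvGrid_eq ground xmin xmax ymin ymax hb]
  congr 1
  -- A side: loops to flatMap
  simp only [← apply_ite (fun ch => [ch])]
  simp only [PySem.List.foldl_append_singleton_eq_map, List.append_assoc]
  rw [PySem.List.foldl_append_eq_flatMap
    (fun y => (PySem.List.pyRange xmin (xmax + 1) 1).map (fun x => if (x, y) ∈ ground then '#' else '.') ++ ['\n'])]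
  rw [List.nil_append, PySem.List.pyRange_neg_one, PySem.List.pyRange_one]
  -- B side: flatten of map to flatMap; both sides to maps over List.range
  rw [List.map_map]
  simp only [List.flatMap_def, List.map_map]
  have e1 : ymax - (ymin - 1) = ymax - ymin + 1 := by ring
  have e2 : xmax + 1 - xmin = xmax - xmin + 1 := by ring
  rw [e1, e2]
  congr 1
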